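-- pv_equiv track=rewrite | github.com/brainbreaks/HiRepliMap | 1_Annot_features.py | identify_TTR
-- ===== SOURCE A (Python) =====
-- def identify_TTR(clusters):
--     L_TTR = []
--     R_TTR = []
--     for i in range(1,len(clusters)-1):
--         if clusters[i-1] <= clusters[i] <= clusters[i+1]:
--             for j in range(i,i+1):
--                 R_TTR.append(j)
--         elif clusters[i-1] >= clusters[i] >= clusters[i+1]:
--             for k in range(i,i+1):
--                 L_TTR.append(k)
--
--     unique_L_TTR=[]
--     [unique_L_TTR.append(e) for e in L_TTR if e not in unique_L_TTR]
--
--     unique_R_TTR=[]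
--     [unique_R_TTR.append(e) for e in R_TTR if e not in unique_R_TTR]
--
--     return unique_L_TTR, unique_R_TTR
-- ===== SOURCE B (Python) =====
-- def identify_TTR(clusters):
--     n = len(clusters)
--     # Maximal blocks of consecutive "up" edges (clusters[e] <= clusters[e+1]):
--     # the interior vertices of each block are exactly the R_TTR indices.
--     R_TTR = []
--     e = 0
--     while e < n - 1:
--         if clusters[e] <= clusters[e + 1]:
--             a = e
--             while e < n - 1 and clusters[e] <= clusters[e + 1]:
--                 e += 1
--             R_TTR.extend(range(a + 1, e))
--         else:
--             e += 1
--     # Same for "down" edges; flat triples are interior to both kinds of block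
--     # and must go to R only, so subtract the R set.
--     cand_L = []
--     e = 0
--     while e < n - 1:
--         if clusters[e] >= clusters[e + 1]:
--             a = e
--             while e < n - 1 and clusters[e] >= clusters[e + 1]:
--                 e += 1
--             cand_L.extend(range(a + 1, e))
--         else:
--             e += 1
--     rset = set(R_TTR)
--     L_TTR = [i for i in cand_L if i not in rset]
--     return L_TTR, R_TTR
-- ===== Notes on version B (the rewrite author's own statement) =====
-- stated objective: faster
-- what changed: B detects maximal non-decreasing / non-increasing runs of adjacent edges with while loops and emits each run's interior vertices as a whole range, then removes the R set from the L candidates, instead of A's per-index triple classification with its two quadratic 'e not in list' dedup passes.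
import Mathlib
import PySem

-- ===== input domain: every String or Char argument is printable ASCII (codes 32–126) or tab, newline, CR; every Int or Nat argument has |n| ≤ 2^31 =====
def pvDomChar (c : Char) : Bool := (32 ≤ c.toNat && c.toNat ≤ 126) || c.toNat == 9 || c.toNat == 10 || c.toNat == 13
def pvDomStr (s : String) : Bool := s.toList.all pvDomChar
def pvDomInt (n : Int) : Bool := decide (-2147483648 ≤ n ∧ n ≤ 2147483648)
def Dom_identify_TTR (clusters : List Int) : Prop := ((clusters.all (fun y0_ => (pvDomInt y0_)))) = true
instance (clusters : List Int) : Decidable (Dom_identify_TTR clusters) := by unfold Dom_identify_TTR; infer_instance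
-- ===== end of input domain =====

-- B finds maximal monotone runs of adjacent edges and emits each run's interior
-- vertices as a block, subtracting the R set from the L candidates (objective: alternative).

-- ===== PORT A =====
def identify_TTR (clusters : List Int) : List Int × List Int :=
  let st := (PySem.List.pyRange 1 ((clusters.length : Int) - 1) 1).foldl
    (fun (p : List Int × List Int) i =>
      if PySem.List.pyGetD clusters (i-1) 0 ≤ PySem.List.pyGetD clusters i 0 ∧
         PySem.List.pyGetD clusters i 0 ≤ PySem.List.pyGetD clusters (i+1) 0 then
        (p.1, (PySem.List.pyRange i (i+1) 1).foldl (fun r j => r ++ [j]) p.2)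
      else if PySem.List.pyGetD clusters (i+1) 0 ≤ PySem.List.pyGetD clusters i 0 ∧
              PySem.List.pyGetD clusters i 0 ≤ PySem.List.pyGetD clusters (i-1) 0 then
        ((PySem.List.pyRange i (i+1) 1).foldl (fun l k => l ++ [k]) p.1, p.2)
      else p) ([], [])
  let uL := st.1.foldl (fun acc e => if e ∈ acc then acc else acc ++ [e]) []
  let uR := st.2.foldl (fun acc e => if e ∈ acc then acc else acc ++ [e]) []
  (uL, uR)

-- ===== PORT B =====
-- inner while loop of Source B: advance e while e < n-1 and cmp(clusters[e], clusters[e+1])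
def pvBlockEnd (c : List Int) (cmp : Int → Int → Bool) : Int → Nat → Int
  | e, 0 => e
  | e, fuel+1 =>
    if e < (c.length : Int) - 1 ∧
       cmp (PySem.List.pyGetD c e 0) (PySem.List.pyGetD c (e+1) 0) = true then
      pvBlockEnd c cmp (e+1) fuel
    else e

-- outer while loop of Source B: emit the interior range(a+1, e) of each maximal cmp-run
def pvScan (c : List Int) (cmp : Int → Int → Bool) : Int → Nat → List Int
  | _, 0 => []
  | e, fuel+1 =>
    if e < (c.length : Int) - 1 then
      if cmp (PySem.List.pyGetD c e 0) (PySem.List.pyGetD c (e+1) 0) then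
        let b := pvBlockEnd c cmp e c.length
        PySem.List.pyRange (e+1) b 1 ++ pvScan c cmp b fuel
      else pvScan c cmp (e+1) fuel
    else []

def identify_TTR_alt (clusters : List Int) : List Int × List Int :=
  let R := pvScan clusters (fun x y => decide (x ≤ y)) 0 clusters.length
  let candL := pvScan clusters (fun x y => decide (x ≥ y)) 0 clusters.length
  let rset := PySem.Set.ofList R
  (candL.filter (fun i => !(PySem.Set.contains rset i)), R)

-- ===== PRECONDITION & SPEC =====
def Spec_identify_TTR (clusters : List Int) (out : List Int × List Int) : Prop := out = identify_TTR_alt clusters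
instance (clusters : List Int) (out : List Int × List Int) : Decidable (Spec_identify_TTR clusters out) := by unfold Spec_identify_TTR; infer_instance

-- ===== CLAIM (what is proved, stated in full; the proofs are below) =====
def Claim_equal_identify_TTR : Prop := ∀ (clusters : List Int), Dom_identify_TTR clusters → Spec_identify_TTR clusters (identify_TTR clusters)

-- ===== LEMMAS AND PROOFS =====

-- abbreviation for "edge i points cmp-wards"
def pvEdge (c : List Int) (cmp : Int → Int → Bool) (i : Int) : Bool :=
  cmp (PySem.List.pyGetD c i 0) (PySem.List.pyGetD c (i+1) 0)

theorem pvBlockEnd_spec (c : List Int) (cmp : Int → Int → Bool) :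
    ∀ (fuel : Nat) (e : Int), (c.length : Int) - 1 ≤ e + fuel →
      e ≤ pvBlockEnd c cmp e fuel ∧
      pvBlockEnd c cmp e fuel ≤ max e ((c.length : Int) - 1) ∧
      (∀ i, e ≤ i → i < pvBlockEnd c cmp e fuel → pvEdge c cmp i = true) ∧
      ((c.length : Int) - 1 ≤ pvBlockEnd c cmp e fuel ∨
        pvEdge c cmp (pvBlockEnd c cmp e fuel) = false) := by
  intro fuel
  induction fuel with
  | zero =>
    intro e h
    refine ⟨le_refl e, le_max_left _ _, fun i h1 h2 => absurd (lt_of_le_of_lt h1 h2) (lt_irrefl e), Or.inl (by simpa using h)⟩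
  | succ f ih =>
    intro e h
    by_cases hc : e < (c.length : Int) - 1 ∧
        cmp (PySem.List.pyGetD c e 0) (PySem.List.pyGetD c (e+1) 0) = true
    · have hrec : pvBlockEnd c cmp e (f+1) = pvBlockEnd c cmp (e+1) f := by
        simp [pvBlockEnd, hc]
      obtain ⟨h1, h2, h3, h4⟩ := ih (e+1) (by omega)
      rw [hrec]
      refine ⟨by omega, ?_, ?_, h4⟩
      · have : max (e+1) ((c.length : Int) - 1) = (c.length : Int) - 1 := by omega
        omega
      · intro i hi1 hi2
        rcases eq_or_lt_of_le hi1 with rfl | hlt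
        · exact hc.2
        · exact h3 i (by omega) hi2
    · have hrec : pvBlockEnd c cmp e (f+1) = e := by
        simp only [pvBlockEnd, if_neg hc]
      rw [hrec]
      refine ⟨le_refl e, le_max_left _ _, fun i h1 h2 => absurd (lt_of_le_of_lt h1 h2) (lt_irrefl e), ?_⟩
      by_cases he : e < (c.length : Int) - 1
      · right
        by_cases hed : pvEdge c cmp e = true
        · exact absurd ⟨he, hed⟩ hc
        · simpa [pvEdge] using hed
      · left; omega

theorem pvScan_char (c : List Int) (cmp : Int → Int → Bool) :
    ∀ (fuel : Nat) (e : Int), 0 ≤ e → (c.length : Int) - 1 ≤ e + fuel →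
      pvScan c cmp e fuel =
        (PySem.List.pyRange (e+1) ((c.length : Int) - 1) 1).filter
          (fun i => pvEdge c cmp (i-1) && pvEdge c cmp i) := by
  intro fuel
  induction fuel with
  | zero =>
    intro e he h
    rw [PySem.List.pyRange_one_eq_nil (by omega)]
    simp [pvScan]
  | succ f ih =>
    intro e he h
    by_cases hlt : e < (c.length : Int) - 1
    · by_cases hed : cmp (PySem.List.pyGetD c e 0) (PySem.List.pyGetD c (e+1) 0) = true
      · -- run case
        have hlen2 : 2 ≤ c.length := by omega
        obtain ⟨k, hk⟩ : ∃ k, c.length = k + 1 := ⟨c.length - 1, by omega⟩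
        have hstep : pvBlockEnd c cmp e c.length = pvBlockEnd c cmp (e+1) k := by
          rw [hk]; simp [pvBlockEnd, hlt, hed]
        obtain ⟨h1, h2, h3, h4⟩ := pvBlockEnd_spec c cmp k (e+1) (by omega)
        set b := pvBlockEnd c cmp (e+1) k with hb
        have hbge : e + 1 ≤ b := h1
        have hble : b ≤ (c.length : Int) - 1 := by
          have : max (e+1) ((c.length : Int) - 1) = (c.length : Int) - 1 := by omega
          omega
        have hedges : ∀ i, e ≤ i → i < b → pvEdge c cmp i = true := by
          intro i hi1 hi2
          rcases eq_or_lt_of_le hi1 with rfl | hlt'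
          · simpa [pvEdge] using hed
          · exact h3 i (by omega) hi2
        have hscan : pvScan c cmp e (f+1) =
            PySem.List.pyRange (e+1) b 1 ++ pvScan c cmp b f := by
          simp only [pvScan, if_pos hlt, if_pos hed, hstep]
        rw [hscan, ih b (by omega) (by omega)]
        rw [PySem.List.pyRange_one_append (e+1) b ((c.length : Int) - 1) hbge hble,
            List.filter_append]
        congr 1
        · -- every interior vertex of the run passes the filter
          symm
          apply List.filter_eq_self.mpr
          intro i hi
          rw [PySem.List.mem_pyRange_one] at hi
          simp [hedges (i-1) (by omega) (by omega), hedges i (by omega) (by omega)]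
        · -- vertex b is filtered out (or out of range)
          rcases h4 with hnl | hfalse
          · have hbeq : b = (c.length : Int) - 1 := le_antisymm hble hnl
            rw [hbeq, PySem.List.pyRange_one_eq_nil (le_refl _),
                PySem.List.pyRange_one_eq_nil (by omega)]
          · by_cases hbr : b < (c.length : Int) - 1
            · rw [PySem.List.pyRange_one_cons hbr]
              simp [hfalse]
            · rw [PySem.List.pyRange_one_eq_nil (by omega),
                  PySem.List.pyRange_one_eq_nil (by omega)]
      · -- single non-cmp edge: skip vertex e+1
        have hscan : pvScan c cmp e (f+1) = pvScan c cmp (e+1) f := by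
          simp only [pvScan, if_pos hlt]
          rw [if_neg hed]
        rw [hscan, ih (e+1) (by omega) (by omega)]
        by_cases hr : e + 1 < (c.length : Int) - 1
        · rw [PySem.List.pyRange_one_cons hr]
          have h0 : pvEdge c cmp e = false := by
            simpa [pvEdge] using hed
          simp [h0]
        · rw [PySem.List.pyRange_one_eq_nil (by omega),
              PySem.List.pyRange_one_eq_nil (by omega)]
    · rw [PySem.List.pyRange_one_eq_nil (by omega)]
      simp [pvScan, hlt]

-- the common two-sided append fold of A computes a pair of filters
theorem pv_core_filter (pR pL : Int → Prop) [DecidablePred pR] [DecidablePred pL]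
    (r : List Int) (accL accR : List Int) :
    r.foldl (fun (p : List Int × List Int) i =>
      if pR i then (p.1, p.2 ++ [i])
      else if pL i then (p.1 ++ [i], p.2)
      else p) (accL, accR)
    = (accL ++ r.filter (fun i => decide (¬ pR i ∧ pL i)),
       accR ++ r.filter (fun i => decide (pR i))) := by
  induction r generalizing accL accR with
  | nil => simp
  | cons x xs ih =>
    by_cases hR : pR x
    · simp [hR, ih]
    · by_cases hL : pL x <;> simp [hR, hL, ih]

-- A's uniq fold is the identity on a Nodup list
theorem pv_dedup_id (l acc : List Int) (h : (acc ++ l).Nodup) :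
    l.foldl (fun acc e => if e ∈ acc then acc else acc ++ [e]) acc = acc ++ l := by
  induction l generalizing acc with
  | nil => simp
  | cons x xs ih =>
    have hx : x ∉ acc := by
      intro hmem
      have := List.Nodup.disjoint h (a := x) hmem
      simp at this
    have h' : ((acc ++ [x]) ++ xs).Nodup := by simpa using h
    simp only [List.foldl_cons, if_neg hx]
    rw [ih _ h']
    simp

theorem identify_TTR_eq (clusters : List Int) :
    identify_TTR clusters = identify_TTR_alt clusters := by
  simp only [identify_TTR, identify_TTR_alt]
  set n : Int := (clusters.length : Int) with hn
  -- collapse A's inner range(i,i+1) folds into single appends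
  simp only [PySem.List.pyRange_one_singleton, List.foldl_cons, List.foldl_nil]
  rw [pv_core_filter]
  simp only [List.nil_append]
  -- A's dedup passes are the identity: the filtered ranges have no duplicates
  rw [pv_dedup_id _ [] (by simpa using (PySem.List.nodup_pyRange_one 1 (n-1)).filter _),
      pv_dedup_id _ [] (by simpa using (PySem.List.nodup_pyRange_one 1 (n-1)).filter _)]
  simp only [List.nil_append]
  -- B's two scans are filters of the same range
  rw [pvScan_char clusters _ clusters.length 0 (le_refl 0) (by omega),
      pvScan_char clusters _ clusters.length 0 (le_refl 0) (by omega)]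
  simp only [zero_add]
  refine Prod.ext_iff.mpr ⟨?_, ?_⟩
  · -- L component: B filters the down-candidates through the R set
    rw [List.filter_filter]
    apply List.filter_congr
    intro i hi
    rw [PySem.List.mem_pyRange_one] at hi
    have hmem : ∀ x : Int,
        PySem.Set.contains (PySem.Set.ofList ((PySem.List.pyRange 1 (n-1) 1).filter
          (fun j => pvEdge clusters (fun a b => decide (a ≤ b)) (j-1) &&
                    pvEdge clusters (fun a b => decide (a ≤ b)) j))) x =
        decide (x ∈ (PySem.List.pyRange 1 (n-1) 1).filter
          (fun j => pvEdge clusters (fun a b => decide (a ≤ b)) (j-1) &&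
                    pvEdge clusters (fun a b => decide (a ≤ b)) j)) := by
      intro x
      by_cases hx : x ∈ (PySem.List.pyRange 1 (n-1) 1).filter
          (fun j => pvEdge clusters (fun a b => decide (a ≤ b)) (j-1) &&
                    pvEdge clusters (fun a b => decide (a ≤ b)) j)
      · simp [PySem.Set.mem_ofList, hx]
      · simp only [hx, decide_false]
        rw [← Bool.not_eq_true, PySem.Set.contains_iff, PySem.Set.mem_ofList]
        exact hx
    rw [hmem]
    simp only [pvEdge, List.mem_filter, PySem.List.mem_pyRange_one, sub_add_cancel]
    by_cases h1 : PySem.List.pyGetD clusters (i-1) 0 ≤ PySem.List.pyGetD clusters i 0 <;>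
      by_cases h2 : PySem.List.pyGetD clusters i 0 ≤ PySem.List.pyGetD clusters (i+1) 0 <;>
      by_cases h3 : PySem.List.pyGetD clusters (i+1) 0 ≤ PySem.List.pyGetD clusters i 0 <;>
      by_cases h4 : PySem.List.pyGetD clusters i 0 ≤ PySem.List.pyGetD clusters (i-1) 0 <;>
      simp [h1, h2, h3, h4, hi.1, hi.2, ge_iff_le]
  · -- R component
    apply List.filter_congr
    intro i hi
    rw [PySem.List.mem_pyRange_one] at hi
    simp only [pvEdge, sub_add_cancel]
    by_cases h1 : PySem.List.pyGetD clusters (i-1) 0 ≤ PySem.List.pyGetD clusters i 0 <;>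
      by_cases h2 : PySem.List.pyGetD clusters i 0 ≤ PySem.List.pyGetD clusters (i+1) 0 <;>
      simp [h1, h2]

-- ===== VERDICT (by name: the statement is the Claim_ definition above) =====
theorem identify_TTR_spec : Claim_equal_identify_TTR := by
  intro clusters _
  unfold Spec_identify_TTR
  exact identify_TTR_eq clusters
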